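-- pv_equiv track=rewrite | github.com/mkmozgawa/aoc21 | day4/first.py | process_bingo_tables
-- ===== SOURCE A (Python) =====
-- def process_bingo_tables(lines):
--     bingo_tables = []
--     table = []
--     for line in lines:
--         if line == '\n':
--             bingo_tables.append(table)
--             table = []
--             continue
--         table += [int(x) for x in line.strip().split(' ') if x]
--     bingo_tables.append(table)
--     return bingo_tables
-- ===== SOURCE B (Python) =====
-- def process_bingo_tables(lines):
--     # Chop at the first separator repeatedly, slicing out each table's lines,
--     # instead of A's single-pass stateful accumulator.
--     tables = []
--     rest = lines
--     while '\n' in rest: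
--         i = rest.index('\n')
--         tables.append([int(x) for line in rest[:i] for x in line.strip().split(' ') if x])
--         rest = rest[i + 1:]
--     tables.append([int(x) for line in rest for x in line.strip().split(' ') if x])
--     return tables
-- ===== Notes on version B (the rewrite author's own statement) =====
-- stated objective: alternative
-- what changed: A builds tables in one pass with a running table accumulator flushed at each '\n'; B instead repeatedly finds the first '\n' separator and slices the table's lines out of the list, parsing each slice as a whole.
import Mathlib
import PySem

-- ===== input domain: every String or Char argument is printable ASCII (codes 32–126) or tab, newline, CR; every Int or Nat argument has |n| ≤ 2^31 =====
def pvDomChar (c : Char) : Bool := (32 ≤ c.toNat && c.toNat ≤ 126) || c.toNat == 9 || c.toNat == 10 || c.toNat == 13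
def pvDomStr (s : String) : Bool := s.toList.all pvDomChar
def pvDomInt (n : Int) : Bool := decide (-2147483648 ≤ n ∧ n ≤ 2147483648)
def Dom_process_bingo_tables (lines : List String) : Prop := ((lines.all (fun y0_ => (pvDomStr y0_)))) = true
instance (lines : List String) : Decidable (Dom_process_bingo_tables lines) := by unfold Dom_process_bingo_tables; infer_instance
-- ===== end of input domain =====

-- B replaces A's single-pass stateful accumulator by repeatedly chopping the list at the
-- first '\n' separator and parsing each slice ("alternative" objective, same cost class).

-- [int(x) for x in line.strip().split(' ') if x]  (the comprehension both Pythons share;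
-- int(x) raises ValueError where ofStr? is none — excluded by Pre_, getD 0 is never read there)
def pvParseLine (line : String) : List Int :=
  (((PySem.Str.split? (PySem.Str.strip line) " ").getD []).filter (fun x => x ≠ "")).map
    (fun x => (PySem.Int.ofStr? x).getD 0)

-- ===== PORT A =====
def process_bingo_tables (lines : List String) : List (List Int) :=
  let s := lines.foldl
    (fun (st : List (List Int) × List Int) line =>
      if line = "\n" then (st.1 ++ [st.2], ([] : List Int))
      else (st.1, st.2 ++ pvParseLine line))
    ([], [])
  s.1 ++ [s.2]

-- ===== PORT B =====
-- the while loop of Source B; rest[:i] / rest[i+1:] are PySem slices, the nested comprehension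
-- over a chunk is its flatMap by pvParseLine.  fuel = len(lines) is a totality guard only:
-- each iteration consumes at least one element, and at fuel 0 rest is already separator-free,
-- so the 0-branch is the loop's own final (no-'\n'-left) step.
def pvBTLoop : Nat → List (List Int) → List String → List (List Int)
  | fuel + 1, tables, rest =>
    (match PySem.List.index? rest "\n" with
     | some i =>
        pvBTLoop fuel
          (tables ++ [(PySem.List.slice rest none (some (i : Int))).flatMap pvParseLine])
          (PySem.List.slice rest (some ((i : Int) + 1)) none)
     | none => tables ++ [rest.flatMap pvParseLine])
  | 0, tables, rest => tables ++ [rest.flatMap pvParseLine]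

def process_bingo_tables_alt (lines : List String) : List (List Int) :=
  pvBTLoop lines.length [] lines

-- ===== PRECONDITION & SPEC =====
-- Pre_ excludes exactly the inputs where Python A raises ValueError: a non-separator line
-- containing a nonempty space-separated token that int() cannot parse.
def Pre_process_bingo_tables (lines : List String) : Prop :=
  ∀ line ∈ lines, line ≠ "\n" →
    ∀ x ∈ (PySem.Str.split? (PySem.Str.strip line) " ").getD [], x ≠ "" →
      (PySem.Int.ofStr? x).isSome
instance (lines : List String) : Decidable (Pre_process_bingo_tables lines) := by
  unfold Pre_process_bingo_tables; infer_instance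

def pvWitness_process_bingo_tables : List String :=
  [" 1 2  3\n", "4 5", "\n", "\n", "6"]

def Spec_process_bingo_tables (lines : List String) (out : List (List Int)) : Prop := out = process_bingo_tables_alt lines
instance (lines : List String) (out : List (List Int)) : Decidable (Spec_process_bingo_tables lines out) := by unfold Spec_process_bingo_tables; infer_instance

-- ===== CLAIM (what is proved, stated in full; the proofs are below) =====
def Claim_equal_process_bingo_tables : Prop := ∀ (lines : List String), Dom_process_bingo_tables lines → Pre_process_bingo_tables lines → Spec_process_bingo_tables lines (process_bingo_tables lines)

-- ===== LEMMAS AND PROOFS =====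

-- prepend to the first chunk
def pvMapHead (f : List Int → List Int) : List (List Int) → List (List Int)
  | [] => []
  | c :: cs => f c :: cs

-- a separator-free rest is finished in one step, whatever the fuel
theorem pvBTLoop_none (fuel : Nat) (tables : List (List Int)) (rest : List String)
    (h : PySem.List.index? rest "\n" = none) :
    pvBTLoop fuel tables rest = tables ++ [rest.flatMap pvParseLine] := by
  have h' := h
  rw [PySem.List.index?_eq_idxOf?] at h'
  cases fuel <;> simp [pvBTLoop, h']

-- one iteration of the while loop, slices already expressed as take/drop
theorem pvBTLoop_some (fuel : Nat) (tables : List (List Int)) (rest : List String) (i : Nat)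
    (h : PySem.List.index? rest "\n" = some i) :
    pvBTLoop (fuel + 1) tables rest =
      pvBTLoop fuel (tables ++ [(rest.take i).flatMap pvParseLine]) (rest.drop (i + 1)) := by
  simp only [pvBTLoop, h]
  rw [show ((i : Int) + 1) = ((i + 1 : Nat) : Int) from by push_cast; ring,
      PySem.List.slice_from_natCast, PySem.List.slice_to_natCast]

-- any fuel ≥ rest.length computes the same result
theorem pvBTLoop_fuel : ∀ (n : Nat) (rest : List String) (f1 f2 : Nat)
    (tables : List (List Int)), rest.length = n → n ≤ f1 → n ≤ f2 →
    pvBTLoop f1 tables rest = pvBTLoop f2 tables rest := by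
  intro n
  induction n using Nat.strong_induction_on with
  | _ n ih =>
    intro rest f1 f2 tables hn h1 h2
    cases h : PySem.List.index? rest "\n" with
    | none => rw [pvBTLoop_none _ _ _ h, pvBTLoop_none _ _ _ h]
    | some i =>
      obtain ⟨hk, -, -⟩ := PySem.List.getElem_of_index?_eq_some h
      obtain ⟨g1, rfl⟩ : ∃ g, f1 = g + 1 := ⟨f1 - 1, by omega⟩
      obtain ⟨g2, rfl⟩ : ∃ g, f2 = g + 1 := ⟨f2 - 1, by omega⟩
      rw [pvBTLoop_some _ _ _ _ h, pvBTLoop_some _ _ _ _ h]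
      exact ih (rest.drop (i + 1)).length (by simp; omega) _ _ _ _ rfl
        (by simp; omega) (by simp; omega)

-- the accumulated tables just sit in front of the loop's output
theorem pvBTLoop_acc : ∀ (fuel : Nat) (rest : List String) (tables : List (List Int)),
    pvBTLoop fuel tables rest = tables ++ pvBTLoop fuel [] rest := by
  intro fuel
  induction fuel with
  | zero => intro rest tables; simp [pvBTLoop]
  | succ g ih =>
    intro rest tables
    cases h : PySem.List.index? rest "\n" with
    | none => rw [pvBTLoop_none _ _ _ h, pvBTLoop_none _ _ _ h]; simp
    | some i =>
      rw [pvBTLoop_some _ _ _ _ h, pvBTLoop_some _ _ _ _ h, ih]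
      conv_rhs => rw [ih]
      simp

theorem pvChunks_nil (fuel : Nat) : pvBTLoop fuel [] [] = [[]] := by
  cases fuel <;> simp [pvBTLoop, PySem.List.index?_eq_idxOf?]

theorem pvChunks_sep (fuel : Nat) (rest : List String) :
    pvBTLoop (fuel + 1) [] ("\n" :: rest) = [] :: pvBTLoop fuel [] rest := by
  rw [pvBTLoop_some _ _ _ _ (PySem.List.index?_cons_self "\n" rest), pvBTLoop_acc]
  simp

theorem pvChunks_ne (line : String) (rest : List String) (fuel : Nat)
    (hne : line ≠ "\n") (hf : rest.length ≤ fuel) :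
    pvBTLoop (fuel + 1) [] (line :: rest) =
      pvMapHead (pvParseLine line ++ ·) (pvBTLoop fuel [] rest) := by
  cases h : PySem.List.index? rest "\n" with
  | none =>
    have hc : PySem.List.index? (line :: rest) "\n" = none := by
      rw [PySem.List.index?_cons_of_ne rest hne, h]; rfl
    rw [pvBTLoop_none _ _ _ hc, pvBTLoop_none _ _ _ h]
    simp [pvMapHead]
  | some i =>
    obtain ⟨hk, -, -⟩ := PySem.List.getElem_of_index?_eq_some h
    obtain ⟨g, rfl⟩ : ∃ g, fuel = g + 1 := ⟨fuel - 1, by omega⟩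
    have hc : PySem.List.index? (line :: rest) "\n" = some (i + 1) := by
      rw [PySem.List.index?_cons_of_ne rest hne, h]; rfl
    rw [pvBTLoop_some _ _ _ _ hc, pvBTLoop_some _ _ _ _ h,
        pvBTLoop_acc (g + 1), pvBTLoop_acc g]
    rw [show (line :: rest).drop (i + 1 + 1) = rest.drop (i + 1) from by
          simp [List.drop_succ_cons],
        show (line :: rest).take (i + 1) = line :: rest.take i from by
          simp [List.take_succ_cons],
        pvBTLoop_fuel (rest.drop (i + 1)).length _ (g + 1) g [] rfl
          (by simp; omega) (by simp; omega)]
    simp [pvMapHead]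

theorem pvMapHead_nil_append (xs : List (List Int)) :
    pvMapHead (fun c => ([] : List Int) ++ c) xs = xs := by
  cases xs <;> simp [pvMapHead]

-- A's fold, started from any state, is that state folded in front of B's chunks
theorem pvA_loop (lines : List String) :
    ∀ bt t,
      (lines.foldl
        (fun (st : List (List Int) × List Int) line =>
          if line = "\n" then (st.1 ++ [st.2], ([] : List Int))
          else (st.1, st.2 ++ pvParseLine line)) (bt, t)).1
        ++ [(lines.foldl
        (fun (st : List (List Int) × List Int) line =>
          if line = "\n" then (st.1 ++ [st.2], ([] : List Int))
          else (st.1, st.2 ++ pvParseLine line)) (bt, t)).2]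
      = bt ++ pvMapHead (t ++ ·) (pvBTLoop lines.length [] lines) := by
  induction lines with
  | nil => intro bt t; simp [pvChunks_nil, pvMapHead]
  | cons line rest ih =>
    intro bt t
    by_cases hsep : line = "\n"
    · subst hsep
      simp only [List.foldl_cons, if_true, List.length_cons]
      rw [ih (bt ++ [t]) [], pvMapHead_nil_append, pvChunks_sep]
      simp [pvMapHead]
    · simp only [List.foldl_cons, if_neg hsep, List.length_cons]
      rw [ih bt (t ++ pvParseLine line), pvChunks_ne line rest rest.length hsep le_rfl]
      cases h : pvBTLoop rest.length [] rest <;> simp [pvMapHead]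

-- ===== VERDICT (by name: the statement is the Claim_ definition above) =====
theorem process_bingo_tables_spec : Claim_equal_process_bingo_tables := by
  intro lines _ _
  unfold Spec_process_bingo_tables process_bingo_tables process_bingo_tables_alt
  rw [pvA_loop lines [] [], pvMapHead_nil_append]
  simp
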